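-- pv_equiv track=rewrite | github.com/kosha316/DNA-AC | process.py | add_index
-- ===== SOURCE A (Python) =====
-- import itertools
--
-- def add_index(seq_list, index_length):
--     index_dic = list()
--     for item in itertools.product('CTGA', repeat=index_length):
--         index_dic.append(''.join(item))
--     for i in range(len(seq_list)):
--         item = seq_list[i]
--         seq_list[i] = index_dic[i] + item
--     return seq_list
-- ===== SOURCE B (Python) =====
-- def add_index(seq_list, index_length):
--     for i, item in enumerate(seq_list):
--         idx = "".join("CTGA"[i // 4 ** p % 4] for p in range(index_length - 1, -1, -1))
--         seq_list[i] = idx + item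
--     return seq_list
-- ===== Notes on version B (the rewrite author's own statement) =====
-- stated objective: simpler
-- what changed: B drops the pre-built table of all 4^index_length index strings and computes each element's index string directly from its position i by base-4 digit extraction ('CTGA' digit map, MSB-first), so only len(seq_list) index strings are ever formed.
-- outside the precondition, e.g. on add_index(['a'], -1): A raises ValueError, B returns ['a']; on add_index(['a', 'b', 'c', 'd', 'e'], 1): A raises IndexError, B returns ['Ca', 'Tb', 'Gc', 'Ad', 'Ce']
import Mathlib
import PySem

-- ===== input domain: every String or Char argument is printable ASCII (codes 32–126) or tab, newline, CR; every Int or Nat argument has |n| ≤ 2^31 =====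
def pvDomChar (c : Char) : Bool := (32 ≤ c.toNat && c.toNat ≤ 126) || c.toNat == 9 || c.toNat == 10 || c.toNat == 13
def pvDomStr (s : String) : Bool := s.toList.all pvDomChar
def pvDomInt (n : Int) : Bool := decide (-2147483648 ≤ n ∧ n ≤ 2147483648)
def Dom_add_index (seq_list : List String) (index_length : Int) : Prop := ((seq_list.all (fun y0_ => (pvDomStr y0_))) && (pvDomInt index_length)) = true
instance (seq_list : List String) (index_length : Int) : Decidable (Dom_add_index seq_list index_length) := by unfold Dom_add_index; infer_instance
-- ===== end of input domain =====

-- B drops A's pre-built table of all 4^index_length index strings and derives each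
-- element's index string directly from its position by base-4 digit extraction (simpler).
-- Both A and B mutate seq_list in place identically on Pre_; the theorems are about the
-- returned value.

-- ===== PORT A =====
-- itertools.product('CTGA', repeat=k): all length-k tuples, leftmost position varying slowest
def prodCTGA : Nat → List (List Char)
  | 0 => [[]]
  | k + 1 => ['C', 'T', 'G', 'A'].flatMap (fun c => (prodCTGA k).map (fun t => c :: t))

def add_index (seq_list : List String) (index_length : Int) : List String :=
  if index_length < 0 then []   -- itertools.product raises ValueError on negative repeat (outside Pre_)
  else
    let index_dic := (prodCTGA index_length.toNat).map String.mk
    (List.range seq_list.length).foldl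
      (fun acc i => acc.set i ((index_dic.getD i "") ++ acc.getD i "")) seq_list

-- ===== PORT B =====
def c4 (r : Nat) : Char := ['C', 'T', 'G', 'A'].getD r ' '

-- "".join("CTGA"[i // 4 ** p % 4] for p in range(k - 1, -1, -1))
def idxChars : Nat → Nat → List Char
  | 0, _ => []
  | p + 1, i => c4 (i / 4 ^ p % 4) :: idxChars p i

def add_index_alt (seq_list : List String) (index_length : Int) : List String :=
  seq_list.mapIdx (fun i s => String.mk (idxChars index_length.toNat i) ++ s)

-- ===== PRECONDITION & SPEC =====
-- A returns normally iff index_length ≥ 0 (else ValueError from itertools.product) and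
-- seq_list.length ≤ 4^index_length (else IndexError on index_dic[i]).  The `min` in the
-- exponent only keeps the power cheap to evaluate: since n ≤ 4^n for every n,
-- `n ≤ 4 ^ min k n` is equivalent to `n ≤ 4 ^ k`; it excludes nothing extra.
def Pre_add_index (seq_list : List String) (index_length : Int) : Prop :=
  0 ≤ index_length ∧ seq_list.length ≤ 4 ^ (min index_length.toNat seq_list.length)
instance (seq_list : List String) (index_length : Int) : Decidable (Pre_add_index seq_list index_length) := by
  unfold Pre_add_index; infer_instance

def pvWitness_add_index : List String × Int := (["ACGT", "ggaa"], 2)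

def Spec_add_index (seq_list : List String) (index_length : Int) (out : List String) : Prop := out = add_index_alt seq_list index_length
instance (seq_list : List String) (index_length : Int) (out : List String) : Decidable (Spec_add_index seq_list index_length out) := by unfold Spec_add_index; infer_instance

-- ===== CLAIM (what is proved, stated in full; the proofs are below) =====
def Claim_equal_add_index : Prop := ∀ (seq_list : List String) (index_length : Int), Dom_add_index seq_list index_length → Pre_add_index seq_list index_length → Spec_add_index seq_list index_length (add_index seq_list index_length)

-- ===== LEMMAS AND PROOFS =====

lemma prodCTGA_length (k : Nat) : (prodCTGA k).length = 4 ^ k := by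
  induction k with
  | zero => rfl
  | succ k ih => simp [prodCTGA, ih, pow_succ]; ring

-- getD of the block structure cs.flatMap (fun c => L.map (c :: ·))
lemma flatMap_blocks_getD (cs : List Char) (L : List (List Char)) :
    ∀ i : Nat, i < cs.length * L.length →
      (cs.flatMap (fun c => L.map (fun t => c :: t))).getD i []
        = cs.getD (i / L.length) ' ' :: L.getD (i % L.length) [] := by
  induction cs with
  | nil => intro i h; simp at h
  | cons c cs ih =>
    intro i h
    by_cases hi : i < L.length
    · have hdiv : i / L.length = 0 := Nat.div_eq_of_lt hi
      have hmod : i % L.length = i := Nat.mod_eq_of_lt hi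
      have hget : L[i]? = some (L[i]'hi) := List.getElem?_eq_getElem hi
      have happ : ((List.map (fun t => c :: t) L) ++
            (cs.flatMap (fun c => L.map (fun t => c :: t))))[i]?
          = (List.map (fun t => c :: t) L)[i]? :=
        List.getElem?_append_left (by simpa using hi)
      simp [List.flatMap_cons, List.getD, happ, List.getElem?_map, hdiv, hmod, hget]
    · have hge : L.length ≤ i := Nat.le_of_not_lt hi
      have hL : 0 < L.length := by
        rcases Nat.eq_zero_or_pos L.length with h0 | h0
        · rw [h0, Nat.mul_zero] at h; omega
        · exact h0
      obtain ⟨j, rfl⟩ : ∃ j, i = L.length + j := ⟨i - L.length, by omega⟩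
      have hj : j < cs.length * L.length := by
        simp only [List.length_cons] at h; nlinarith
      have hdiv : (L.length + j) / L.length = j / L.length + 1 := by
        rw [Nat.add_comm, Nat.add_div_right _ hL]
      have hmod : (L.length + j) % L.length = j % L.length := Nat.add_mod_left _ _
      have happ : ((c :: cs).flatMap (fun c => L.map (fun t => c :: t))).getD (L.length + j) []
          = (cs.flatMap (fun c => L.map (fun t => c :: t))).getD j [] := by
        simp [List.flatMap_cons, List.getD, List.getElem?_append_right
          (show (L.map (fun t => c :: t)).length ≤ L.length + j by simp)]
      rw [happ, ih j hj, hdiv, hmod]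
      simp [List.getD]

lemma idxChars_congr_mod (k : Nat) : ∀ i j : Nat, i % 4 ^ k = j % 4 ^ k → idxChars k i = idxChars k j := by
  induction k with
  | zero => intro i j _; rfl
  | succ k ih =>
    intro i j h
    have hd : i / 4 ^ k % 4 = j / 4 ^ k % 4 := by
      have hi : i % 4 ^ (k + 1) / 4 ^ k = i / 4 ^ k % 4 := by
        rw [pow_succ]; exact Nat.mod_mul_right_div_self i (4 ^ k) 4
      have hjj : j % 4 ^ (k + 1) / 4 ^ k = j / 4 ^ k % 4 := by
        rw [pow_succ]; exact Nat.mod_mul_right_div_self j (4 ^ k) 4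
      rw [← hi, ← hjj, h]
    have ht : i % 4 ^ k = j % 4 ^ k := by
      have hdvd : (4:Nat) ^ k ∣ 4 ^ (k + 1) := pow_dvd_pow 4 (by omega)
      rw [← Nat.mod_mod_of_dvd i hdvd, ← Nat.mod_mod_of_dvd j hdvd, h]
    simp [idxChars, hd, ih _ _ ht]

lemma prodCTGA_getD (k : Nat) : ∀ i : Nat, i < 4 ^ k → (prodCTGA k).getD i [] = idxChars k i := by
  induction k with
  | zero => intro i h; interval_cases i; rfl
  | succ k ih =>
    intro i h
    have hlen : (prodCTGA k).length = 4 ^ k := prodCTGA_length k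
    have hb : i < (['C','T','G','A'] : List Char).length * (prodCTGA k).length := by
      simp [hlen]; rw [pow_succ] at h; omega
    have := flatMap_blocks_getD ['C','T','G','A'] (prodCTGA k) i hb
    rw [show (prodCTGA (k+1)) = (['C','T','G','A'] : List Char).flatMap
          (fun c => (prodCTGA k).map (fun t => c :: t)) from rfl, this, hlen]
    have hdlt : i / 4 ^ k < 4 := by
      apply Nat.div_lt_of_lt_mul; rw [pow_succ] at h; omega
    have hdm : i / 4 ^ k % 4 = i / 4 ^ k := Nat.mod_eq_of_lt hdlt
    have hmodlt : i % 4 ^ k < 4 ^ k := Nat.mod_lt _ (Nat.pow_pos (by norm_num))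
    rw [ih _ hmodlt]
    have : idxChars k (i % 4 ^ k) = idxChars k i :=
      idxChars_congr_mod k _ _ (Nat.mod_mod_of_dvd i dvd_rfl)
    rw [this]
    simp [idxChars, c4, hdm]

-- A's in-place loop: after processing indices [j, j+post.length), with the first j
-- elements (pre) already final, only post gets rewritten elementwise.
lemma foldl_set_loop (f : Nat → String → String) :
    ∀ (post pre : List String),
      (List.range' pre.length post.length).foldl
          (fun acc i => acc.set i (f i (acc.getD i ""))) (pre ++ post)
        = pre ++ post.mapIdx (fun t s => f (pre.length + t) s) := by
  intro post
  induction post with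
  | nil => intro pre; simp
  | cons s rest ih =>
    intro pre
    rw [List.length_cons, List.range'_succ, List.foldl_cons]
    have hget : (pre ++ s :: rest).getD pre.length "" = s := by
      simp [List.getD]
    have hset : (pre ++ s :: rest).set pre.length (f pre.length s)
        = (pre ++ [f pre.length s]) ++ rest := by
      simp
    have hlen : (pre ++ [f pre.length s]).length = pre.length + 1 := by simp
    rw [hget, hset, ← hlen, ih (pre ++ [f pre.length s]), hlen]
    simp only [List.mapIdx_cons, List.append_assoc, List.cons_append, List.nil_append,
      Nat.add_zero]
    have hfun : (fun t (s : String) => f (pre.length + 1 + t) s)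
        = (fun i s => f (pre.length + (i + 1)) s) := by
      funext t u; congr 1; omega
    rw [hfun]

lemma mapIdx_congr_strings (f g : Nat → String → String) :
    ∀ (l : List String), (∀ i, i < l.length → ∀ s, f i s = g i s) →
      l.mapIdx f = l.mapIdx g := by
  intro l
  induction l generalizing f g with
  | nil => intro _; rfl
  | cons a l ih =>
    intro h
    rw [List.mapIdx_cons, List.mapIdx_cons, h 0 (by simp) a]
    congr 1
    exact ih _ _ (fun i hi s => h (i + 1) (by simpa using Nat.succ_lt_succ hi) s)

lemma length_le_pow (seq_list : List String) (index_length : Int)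
    (hp : Pre_add_index seq_list index_length) :
    seq_list.length ≤ 4 ^ index_length.toNat := by
  obtain ⟨_, h2⟩ := hp
  rcases le_total index_length.toNat seq_list.length with hle | hle
  · rwa [min_eq_left hle] at h2
  · calc seq_list.length ≤ 4 ^ seq_list.length :=
          le_of_lt (Nat.lt_pow_self (by norm_num))
      _ ≤ 4 ^ index_length.toNat := Nat.pow_le_pow_right (by norm_num) hle

-- ===== VERDICT (by name: the statement is the Claim_ definition above) =====
theorem add_index_spec : Claim_equal_add_index := by
  intro seq_list index_length _ hpre
  unfold Spec_add_index add_index add_index_alt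
  rw [if_neg (not_lt.mpr hpre.1)]
  have hlen : seq_list.length ≤ 4 ^ index_length.toNat := length_le_pow _ _ hpre
  have h1 := foldl_set_loop
    (fun i s => ((prodCTGA index_length.toNat).map String.mk).getD i "" ++ s) seq_list []
  simp only [List.length_nil, List.nil_append, Nat.zero_add] at h1
  rw [List.range_eq_range', h1]
  apply mapIdx_congr_strings
  intro i hi s
  have hiK : i < 4 ^ index_length.toNat := lt_of_lt_of_le hi hlen
  have hi' : i < (prodCTGA index_length.toNat).length := by
    rw [prodCTGA_length]; exact hiK
  have hd : ((prodCTGA index_length.toNat).map String.mk).getD i ""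
      = String.mk ((prodCTGA index_length.toNat).getD i []) := by
    simp [List.getD, List.getElem?_map, List.getElem?_eq_getElem hi']
  rw [hd, prodCTGA_getD _ i hiK]
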